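-- pv_equiv track=rewrite | github.com/Queue-Bit-1/wolf | src/wolf/agents/prompt_builder.py | _fuzzy_match_target
-- ===== SOURCE A (Python) =====
-- def _fuzzy_match_target(raw: str, valid_targets: list[str]) -> str | None:
--     """Try to match *raw* against *valid_targets* (case-insensitive)."""
--     raw_lower = raw.lower().strip()
--     for target in valid_targets:
--         if target.lower() == raw_lower:
--             return target
--     # Substring match as last resort.
--     for target in valid_targets:
--         if raw_lower in target.lower() or target.lower() in raw_lower:
--             return target
--     return None
-- ===== SOURCE B (Python) =====
-- def _fuzzy_match_target(raw: str, valid_targets: list[str]) -> str | None: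
--     """Single pass: exact match returns immediately; first substring match is
--     remembered as a fallback candidate and returned only after the full scan."""
--     raw_lower = raw.lower().strip()
--     candidate = None
--     for target in valid_targets:
--         tl = target.lower()
--         if tl == raw_lower:
--             return target
--         if candidate is None and (raw_lower in tl or tl in raw_lower):
--             candidate = target
--     return candidate
-- ===== Notes on version B (the rewrite author's own statement) =====
-- stated objective: alternative
-- what changed: A's two sequential scans (exact pass, then substring pass) are merged into one loop that returns on an exact match and remembers the first substring match as a fallback candidate.
import Mathlib
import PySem

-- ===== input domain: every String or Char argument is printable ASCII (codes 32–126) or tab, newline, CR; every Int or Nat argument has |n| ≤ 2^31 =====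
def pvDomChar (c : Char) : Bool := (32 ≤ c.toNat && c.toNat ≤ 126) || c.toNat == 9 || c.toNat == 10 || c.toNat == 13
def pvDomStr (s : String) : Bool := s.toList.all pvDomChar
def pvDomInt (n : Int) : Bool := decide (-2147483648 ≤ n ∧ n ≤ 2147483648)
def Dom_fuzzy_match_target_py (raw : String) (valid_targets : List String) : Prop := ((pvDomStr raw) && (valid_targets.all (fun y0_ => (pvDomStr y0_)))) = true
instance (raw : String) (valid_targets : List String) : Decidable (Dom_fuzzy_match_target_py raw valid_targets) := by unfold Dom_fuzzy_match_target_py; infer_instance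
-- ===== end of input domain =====

-- B merges A's two sequential scans into a single loop that keeps the first
-- substring-match candidate while still returning immediately on an exact match
-- (objective: alternative decomposition, same cost).


-- ===== PORT A =====
-- first for-loop with early return = List.find? on the exact predicate,
-- second for-loop with early return = List.find? on the substring predicate
def fuzzy_match_target_py (raw : String) (valid_targets : List String) : Option String :=
  let raw_lower := PySem.Str.strip (PySem.Str.lower raw)
  match valid_targets.find? (fun target => PySem.Str.lower target == raw_lower) with
  | some target => some target
  | none =>
      match valid_targets.find? (fun target =>
          PySem.Str.isIn raw_lower (PySem.Str.lower target) ||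
          PySem.Str.isIn (PySem.Str.lower target) raw_lower) with
      | some target => some target
      | none => none

-- ===== PORT B =====
-- B's single loop, carried state = the substring-match candidate
def fuzzy_alt_loop (raw_lower : String) : List String → Option String → Option String
  | [], candidate => candidate
  | target :: rest, candidate =>
      let tl := PySem.Str.lower target
      if tl == raw_lower then some target
      else if candidate.isNone &&
              (PySem.Str.isIn raw_lower tl || PySem.Str.isIn tl raw_lower) then
        fuzzy_alt_loop raw_lower rest (some target)
      else
        fuzzy_alt_loop raw_lower rest candidate

def fuzzy_match_target_py_alt (raw : String) (valid_targets : List String) : Option String :=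
  fuzzy_alt_loop (PySem.Str.strip (PySem.Str.lower raw)) valid_targets none

-- ===== PRECONDITION & SPEC =====
def Spec_fuzzy_match_target_py (raw : String) (valid_targets : List String) (out : Option String) : Prop := out = fuzzy_match_target_py_alt raw valid_targets
instance (raw : String) (valid_targets : List String) (out : Option String) : Decidable (Spec_fuzzy_match_target_py raw valid_targets out) := by unfold Spec_fuzzy_match_target_py; infer_instance

-- ===== CLAIM (what is proved, stated in full; the proofs are below) =====
def Claim_equal_fuzzy_match_target_py : Prop := ∀ (raw : String) (valid_targets : List String), Dom_fuzzy_match_target_py raw valid_targets → Spec_fuzzy_match_target_py raw valid_targets (fuzzy_match_target_py raw valid_targets)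

-- ===== LEMMAS AND PROOFS =====

-- Invariant of B's loop: exact match (anywhere in the remaining list) wins;
-- otherwise the already-recorded candidate, and failing that the first
-- substring match of the remaining list, is returned.
theorem fuzzy_alt_loop_eq (rl : String) (xs : List String) (cand : Option String) :
    fuzzy_alt_loop rl xs cand =
      match xs.find? (fun t => PySem.Str.lower t == rl) with
      | some t => some t
      | none =>
          cand.orElse (fun _ => xs.find? (fun t =>
            PySem.Str.isIn rl (PySem.Str.lower t) ||
            PySem.Str.isIn (PySem.Str.lower t) rl)) := by
  induction xs generalizing cand with
  | nil => cases cand <;> simp [fuzzy_alt_loop, Option.orElse]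
  | cons t rest ih =>
      simp only [fuzzy_alt_loop, List.find?]
      by_cases he : (PySem.Str.lower t == rl) = true
      · simp [he]
      · simp only [he, if_false, Bool.false_eq_true]
        cases cand with
        | some c =>
            simp only [Option.isNone_some, Bool.false_and, if_false, ih, Bool.false_eq_true]
            cases rest.find? (fun t => PySem.Str.lower t == rl) <;>
              simp [Option.orElse]
        | none =>
            by_cases hs : (PySem.Str.isIn rl (PySem.Str.lower t) ||
                PySem.Str.isIn (PySem.Str.lower t) rl) = true
            · simp only [Option.isNone_none, Bool.true_and, hs, if_true, ih]
              cases rest.find? (fun t => PySem.Str.lower t == rl) <;>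
                simp [Option.orElse]
            · simp only [Option.isNone_none, Bool.true_and, hs, if_false, ih,
                Bool.false_eq_true]

-- ===== VERDICT (by name: the statement is the Claim_ definition above) =====
theorem fuzzy_match_target_py_spec : Claim_equal_fuzzy_match_target_py := by
  intro raw valid_targets _
  unfold Spec_fuzzy_match_target_py fuzzy_match_target_py fuzzy_match_target_py_alt
  rw [fuzzy_alt_loop_eq]
  cases h1 : valid_targets.find? (fun target => PySem.Str.lower target == PySem.Str.strip (PySem.Str.lower raw)) <;>
    cases h2 : valid_targets.find? (fun target =>
        PySem.Str.isIn (PySem.Str.strip (PySem.Str.lower raw)) (PySem.Str.lower target) ||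
        PySem.Str.isIn (PySem.Str.lower target) (PySem.Str.strip (PySem.Str.lower raw))) <;>
    simp only [h1, h2, Option.orElse]
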